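-- pv_equiv track=rewrite | github.com/ChristianLeininger/algoExpert | strings/medium/minimumCharactersForWords/minimumCharactersForWords.py | minimumCharactersForWords
-- ===== SOURCE A (Python) =====
-- from typing import List
--
-- def minimumCharactersForWords(words: List[str]) -> List[str]:
--     """  Compute the minimum characters for words
--          and return the list of characters
--          use a dictionary to store the characters and the count
--
--     Args:
--         param1(list): list of strings
--     Return: list of characters
--
--     """
--     char_dict = dict()
--
--     for w in words:
--         w_dict = dict()
--         for c in w:
--             if c in w_dict:
--                 w_dict[c] += 1
--             else:
--                 w_dict.update({c: 1})
--         for k in w_dict: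
--             if k in char_dict:
--                 if w_dict[k] > char_dict[k]:
--                     char_dict[k] = w_dict[k]
--             else:
--                 char_dict.update({k: w_dict[k]})
--     return [k for k, v in char_dict.items() for _ in range(v)]
-- ===== SOURCE B (Python) =====
-- def minimumCharactersForWords(words):
--     # distinct characters in first-appearance order, then for each the
--     # maximum number of times it occurs in any single word
--     order = dict.fromkeys(c for w in words for c in w)
--     return [c for c in order
--             for _ in range(max(w.count(c) for w in words))]
-- ===== Notes on version B (the rewrite author's own statement) =====
-- stated objective: simpler
-- what changed: A builds a per-word count dict and conditionally max-merges it into a running dict; B instead collects the distinct characters in first-appearance order with dict.fromkeys and, for each, takes max(w.count(c)) over the words directly.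
import Mathlib
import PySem

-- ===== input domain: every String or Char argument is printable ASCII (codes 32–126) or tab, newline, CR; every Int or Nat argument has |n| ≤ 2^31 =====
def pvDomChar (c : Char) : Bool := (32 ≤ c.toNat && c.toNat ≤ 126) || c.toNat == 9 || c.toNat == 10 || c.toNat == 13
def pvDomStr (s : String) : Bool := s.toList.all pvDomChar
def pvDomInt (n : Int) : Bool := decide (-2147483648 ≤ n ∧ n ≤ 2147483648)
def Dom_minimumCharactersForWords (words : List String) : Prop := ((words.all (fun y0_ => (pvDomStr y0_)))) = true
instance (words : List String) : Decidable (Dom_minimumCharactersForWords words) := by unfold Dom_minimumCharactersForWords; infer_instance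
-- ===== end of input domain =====

-- B replaces A's two nested counting dicts and conditional max-merge by one pass collecting
-- the distinct characters in order and, per character, the maximum per-word count (simpler).

-- ===== PORT A =====
def minimumCharactersForWords (words : List String) : List String :=
  let charDict : PySem.Dict Char Int := words.foldl (fun charDict w =>
    let wDict : PySem.Dict Char Int := w.toList.foldl (fun d c =>
      if d.contains c then d.insert c (d.getD c 0 + 1) else d.insert c 1)
      PySem.Dict.empty
    wDict.keys.foldl (fun cd k =>
      if cd.contains k then
        if wDict.getD k 0 > cd.getD k 0 then cd.insert k (wDict.getD k 0) else cd
      else cd.insert k (wDict.getD k 0)) charDict)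
    PySem.Dict.empty
  charDict.items.flatMap (fun p =>
    (PySem.List.pyRange 0 p.2 1).map (fun _ => String.ofList [p.1]))

-- ===== PORT B =====
def minimumCharactersForWords_alt (words : List String) : List String :=
  let order := PySem.List.dedup (words.flatMap String.toList)
  order.flatMap (fun c =>
    let m : Int := match PySem.List.max?
        (words.map (fun w => (PySem.Str.count w (String.ofList [c]) : Int))) (fun y => y) with
      | some m => m
      | none => 0   -- unreachable: c ∈ order means words is nonempty (Python's max never sees an empty iterable here)
    (PySem.List.pyRange 0 m 1).map (fun _ => String.ofList [c]))

-- ===== PRECONDITION & SPEC =====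
def Spec_minimumCharactersForWords (words : List String) (out : List String) : Prop := out = minimumCharactersForWords_alt words
instance (words : List String) (out : List String) : Decidable (Spec_minimumCharactersForWords words out) := by unfold Spec_minimumCharactersForWords; infer_instance

-- ===== CLAIM (what is proved, stated in full; the proofs are below) =====
def Claim_equal_minimumCharactersForWords : Prop := ∀ (words : List String), Dom_minimumCharactersForWords words → Spec_minimumCharactersForWords words (minimumCharactersForWords words)

-- ===== LEMMAS AND PROOFS =====

lemma pvWDict_eq_counter (l : List Char) :
    l.foldl (fun d c =>
      if d.contains c then d.insert c (d.getD c 0 + 1) else d.insert c 1)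
      (PySem.Dict.empty : PySem.Dict Char Int) = PySem.Dict.counter l := by
  have h : (fun (d : PySem.Dict Char Int) c =>
      if d.contains c then d.insert c (d.getD c 0 + 1) else d.insert c 1)
      = (fun d c => d.insert c (d.getD c 0 + 1)) := by
    funext d c
    by_cases h : d.contains c
    · simp [h]
    · simp only [Bool.not_eq_true] at h
      rw [if_neg (by simp [h]), PySem.Dict.getD_of_not_contains d 0 h, zero_add]
  rw [h, PySem.Dict.foldl_insert_getD_add_one_eq_counter]

lemma pvStep_spec (vd : Char → Int) (hv : ∀ k, 0 ≤ vd k) (k : Char)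
    (cd : PySem.Dict Char Int) (h : cd.keys.Nodup) :
    (if cd.contains k then
        if vd k > cd.getD k 0 then cd.insert k (vd k) else cd
      else cd.insert k (vd k)).keys = PySem.Set.add cd.keys k ∧
    (if cd.contains k then
        if vd k > cd.getD k 0 then cd.insert k (vd k) else cd
      else cd.insert k (vd k)).keys.Nodup ∧
    ∀ j, (if cd.contains k then
        if vd k > cd.getD k 0 then cd.insert k (vd k) else cd
      else cd.insert k (vd k)).getD j 0 =
      if j = k then max (cd.getD j 0) (vd j) else cd.getD j 0 := by
  by_cases hc : cd.contains k
  · have hk : PySem.Set.add cd.keys k = cd.keys := by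
      simp [PySem.Set.add, PySem.Set.contains, (PySem.Dict.contains_iff_mem_keys cd k).mp hc]
    by_cases hgt : vd k > cd.getD k 0
    · refine ⟨?_, ?_, ?_⟩
      · simp [hc, hgt, PySem.Dict.keys_insert_of_contains cd _ hc, hk]
      · simp only [hc, hgt, if_true]
        exact PySem.Dict.nodup_keys_insert _ _ _ h
      · intro j
        simp only [hc, hgt, if_true]
        rw [PySem.Dict.getD_insert]
        by_cases hj : j = k
        · subst hj; simp [max_eq_right (le_of_lt hgt)]
        · simp [hj]
    · refine ⟨?_, ?_, ?_⟩
      · simp [hc, hgt, hk]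
      · simpa [hc, hgt] using h
      · intro j
        simp only [hc, hgt, if_true, if_false]
        by_cases hj : j = k
        · subst hj; simp [max_eq_left (not_lt.mp hgt)]
        · simp [hj]
  · have hc' : cd.contains k = false := by simpa using hc
    have hk : PySem.Set.add cd.keys k = cd.keys ++ [k] := by
      have hm : ¬ k ∈ cd.keys := fun hm => hc ((PySem.Dict.contains_iff_mem_keys cd k).mpr hm)
      simp [PySem.Set.add, PySem.Set.contains, hm]
    refine ⟨?_, ?_, ?_⟩
    · simp [hc', PySem.Dict.keys_insert_of_not_contains cd _ hc', hk]
    · rw [if_neg (by simp [hc'])]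
      exact PySem.Dict.nodup_keys_insert _ _ _ h
    · intro j
      rw [if_neg (by simp [hc']), PySem.Dict.getD_insert]
      by_cases hj : j = k
      · subst hj
        simp [PySem.Dict.getD_of_not_contains cd 0 hc', max_eq_right (hv j)]
      · simp [hj]

lemma pvMerge_spec (vd : Char → Int) (hv : ∀ k, 0 ≤ vd k) (ks : List Char)
    (cd : PySem.Dict Char Int) (h : cd.keys.Nodup) :
    (ks.foldl (fun cd k =>
        if cd.contains k then
          if vd k > cd.getD k 0 then cd.insert k (vd k) else cd
        else cd.insert k (vd k)) cd).keys = PySem.Set.update cd.keys ks ∧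
    (ks.foldl (fun cd k =>
        if cd.contains k then
          if vd k > cd.getD k 0 then cd.insert k (vd k) else cd
        else cd.insert k (vd k)) cd).keys.Nodup ∧
    ∀ j, (ks.foldl (fun cd k =>
        if cd.contains k then
          if vd k > cd.getD k 0 then cd.insert k (vd k) else cd
        else cd.insert k (vd k)) cd).getD j 0 =
      if j ∈ ks then max (cd.getD j 0) (vd j) else cd.getD j 0 := by
  induction ks generalizing cd with
  | nil => exact ⟨by simp [PySem.Set.update], h, by simp⟩
  | cons k ks ih =>
    obtain ⟨hk1, hn1, hg1⟩ := pvStep_spec vd hv k cd h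
    obtain ⟨hk2, hn2, hg2⟩ := ih _ hn1
    refine ⟨?_, hn2, ?_⟩
    · rw [List.foldl_cons, hk2, hk1, PySem.Set.update_cons]
    · intro j
      rw [List.foldl_cons, hg2 j, hg1 j]
      by_cases hj : j = k
      · subst hj
        by_cases hm : j ∈ ks <;> simp [hm]
      · by_cases hm : j ∈ ks <;> simp [hj, hm]

def pvMaxCount (ws : List String) (k : Char) : Int :=
  (ws.map (fun w => (w.toList.count k : Int))).foldl max 0

lemma pvMaxCount_nonneg (ws : List String) (k : Char) : 0 ≤ pvMaxCount ws k :=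
  (PySem.List.le_foldl_max _ 0).1

lemma pvMaxCount_append (ws : List String) (w : String) (j : Char) :
    pvMaxCount (ws ++ [w]) j = max (pvMaxCount ws j) (w.toList.count j : Int) := by
  simp [pvMaxCount, List.foldl_append]

def pvOuter (charDict : PySem.Dict Char Int) (w : String) : PySem.Dict Char Int :=
  let wDict : PySem.Dict Char Int := w.toList.foldl (fun d c =>
    if d.contains c then d.insert c (d.getD c 0 + 1) else d.insert c 1)
    PySem.Dict.empty
  wDict.keys.foldl (fun cd k =>
    if cd.contains k then
      if wDict.getD k 0 > cd.getD k 0 then cd.insert k (wDict.getD k 0) else cd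
    else cd.insert k (wDict.getD k 0)) charDict

lemma pvCharDict_spec (ws : List String) :
    (ws.foldl pvOuter PySem.Dict.empty).keys = PySem.List.dedup (ws.flatMap String.toList) ∧
    (ws.foldl pvOuter PySem.Dict.empty).keys.Nodup ∧
    ∀ j, (ws.foldl pvOuter PySem.Dict.empty).getD j 0 = pvMaxCount ws j := by
  induction ws using List.reverseRecOn with
  | nil => exact ⟨by simp [PySem.List.dedup], by simp, by intro j; simp [pvMaxCount]⟩
  | append_singleton ws w ih =>
    obtain ⟨hk, hn, hg⟩ := ih
    rw [List.foldl_append, List.foldl_cons, List.foldl_nil]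
    have hout : pvOuter (ws.foldl pvOuter PySem.Dict.empty) w =
        (PySem.Dict.counter w.toList).keys.foldl (fun cd k =>
          if cd.contains k then
            if (PySem.Dict.counter w.toList).getD k 0 > cd.getD k 0 then
              cd.insert k ((PySem.Dict.counter w.toList).getD k 0) else cd
          else cd.insert k ((PySem.Dict.counter w.toList).getD k 0))
          (ws.foldl pvOuter PySem.Dict.empty) := by
      rw [pvOuter, pvWDict_eq_counter]
    have hv : ∀ k, 0 ≤ (PySem.Dict.counter w.toList).getD k 0 := by
      intro k; rw [PySem.Dict.getD_counter]; positivity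
    obtain ⟨mk, mn, mg⟩ := pvMerge_spec _ hv (PySem.Dict.counter w.toList).keys
      (ws.foldl pvOuter PySem.Dict.empty) hn
    rw [hout]
    refine ⟨?_, mn, ?_⟩
    · rw [mk, hk, PySem.Dict.keys_counter]
      simp only [PySem.List.dedup_eq_ofList]
      rw [PySem.Set.update_eq_append_filter, PySem.Set.ofList_ofList,
        ← PySem.Set.update_eq_append_filter, ← PySem.Set.ofList_append, List.flatMap_append]
      simp
    · intro j
      rw [mg j, hg j, pvMaxCount_append]
      by_cases hm : j ∈ w.toList
      · rw [if_pos (by rw [PySem.Dict.keys_counter]; exact (PySem.Set.mem_ofList _ _).mpr hm),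
          PySem.Dict.getD_counter]
      · rw [if_neg (by rw [PySem.Dict.keys_counter]; exact fun hc => hm ((PySem.Set.mem_ofList _ _).mp hc)),
          List.count_eq_zero_of_not_mem hm]
        simp [max_eq_left (pvMaxCount_nonneg ws j)]

lemma pvCountGo_single (c : Char) (l : List Char) : ∀ (fuel acc : Nat), l.length ≤ fuel →
    PySem.Chars.count.go [c] fuel l acc = acc + l.count c := by
  induction l with
  | nil => intro fuel acc _; cases fuel <;> simp [PySem.Chars.count.go]
  | cons x t ih =>
    intro fuel acc hf
    cases fuel with
    | zero => simp at hf
    | succ fuel =>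
      rw [PySem.Chars.count.go]
      rw [List.length_cons] at hf
      have hf' : t.length ≤ fuel := Nat.succ_le_succ_iff.mp hf
      by_cases hx : c = x
      · subst hx
        simp only [List.isPrefixOf, BEq.rfl, Bool.true_and, if_true,
          List.length_nil, List.length_cons, List.drop_succ_cons, List.drop_zero]
        rw [ih fuel (acc + 1) hf', List.count_cons_self]
        omega
      · rw [if_neg (by simp [List.isPrefixOf, beq_iff_eq, hx]), ih fuel acc hf',
          List.count_cons_of_ne (fun h => hx h.symm)]

lemma pvStrCount_single (w : String) (c : Char) :
    PySem.Str.count w (String.ofList [c]) = w.toList.count c := by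
  simp only [PySem.Str.count, String.toList_ofList]
  rw [PySem.Chars.count, if_neg (by simp), pvCountGo_single c _ _ 0 le_rfl, Nat.zero_add]

lemma pvMain (words : List String) :
    minimumCharactersForWords words = minimumCharactersForWords_alt words := by
  obtain ⟨hk, hn, hg⟩ := pvCharDict_spec words
  have hA : minimumCharactersForWords words =
      (words.foldl pvOuter PySem.Dict.empty).items.flatMap (fun p =>
        (PySem.List.pyRange 0 p.2 1).map (fun _ => String.ofList [p.1])) := rfl
  rw [hA, PySem.Dict.items_eq_map_keys _ hn 0, hk, List.flatMap_map,
    minimumCharactersForWords_alt]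
  simp only [List.flatMap_def]
  refine congrArg List.flatten (List.map_congr_left ?_)
  intro c hc
  have hcw : c ∈ words.flatMap String.toList := by
    have := (PySem.List.mem_dedup _ _).mp hc
    exact this
  obtain ⟨w0, rest⟩ : ∃ w0 rest, words = w0 :: rest := by
    cases words with
    | nil => simp at hcw
    | cons a l => exact ⟨a, l, rfl⟩
  obtain ⟨rest, hws⟩ := rest
  subst hws
  simp only [List.map_cons, pvStrCount_single, PySem.List.max?_id_cons,
    hg c]
  have hM : pvMaxCount (w0 :: rest) c =
      (rest.map (fun w => ((w.toList.count c : Nat) : Int))).foldl max ((w0.toList.count c : Nat) : Int) := by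
    simp [pvMaxCount, List.foldl_cons]
  rw [hM]

-- ===== VERDICT (by name: the statement is the Claim_ definition above) =====
theorem minimumCharactersForWords_spec : Claim_equal_minimumCharactersForWords := by
  intro words _
  exact pvMain words
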